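-- pv_equiv track=rewrite | github.com/Hyuga-Yamaguchi/competitve-programing | problem/tessoku/a21.py | segment_dp
-- ===== SOURCE A (Python) =====
-- def segment_dp(n, points):
--     dp = [[0] * n for _ in range(n)]
--
--     for l in range(n):
--         for r in range(n - 1, l - 1, -1):
--             left_score = points[l - 1][1] if l > 0 and l <= points[l - 1][0] <= r else 0
--             right_score = (
--                 points[r + 1][1] if r < n - 1 and l <= points[r + 1][0] <= r else 0
--             )
--
--             dp[l][r] = max(
--                 dp[l][r + 1] + right_score if r < n - 1 else 0,
--                 dp[l - 1][r] + left_score if l > 0 else 0,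
--             )
--     return max(dp[i][i] for i in range(n))
-- ===== SOURCE B (Python) =====
-- def segment_dp(n, points):
--     # Top-down memoized recursion over interval states [l, r] instead of an
--     # explicit n x n table: f(l, r) = best score obtainable expanding [l, r]
--     # to the full interval, answered from the singleton states.
--     memo = {}
--
--     def f(l, r):
--         key = (l, r)
--         if key in memo:
--             return memo[key]
--         take_right = (
--             f(l, r + 1) + (points[r + 1][1] if l <= points[r + 1][0] <= r else 0)
--             if r < n - 1
--             else 0
--         )
--         take_left = (
--             f(l - 1, r) + (points[l - 1][1] if l <= points[l - 1][0] <= r else 0)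
--             if l > 0
--             else 0
--         )
--         memo[key] = max(take_right, take_left)
--         return memo[key]
--
--     return max(f(i, i) for i in range(n))
-- ===== Notes on version B (the rewrite author's own statement) =====
-- stated objective: alternative
-- what changed: Replaces A's bottom-up n-by-n table (rows filled l-ascending, r-descending) with a top-down memoized recursion f(l,r) over interval states, recursing from the singleton intervals outward with no explicit table.
import Mathlib
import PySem

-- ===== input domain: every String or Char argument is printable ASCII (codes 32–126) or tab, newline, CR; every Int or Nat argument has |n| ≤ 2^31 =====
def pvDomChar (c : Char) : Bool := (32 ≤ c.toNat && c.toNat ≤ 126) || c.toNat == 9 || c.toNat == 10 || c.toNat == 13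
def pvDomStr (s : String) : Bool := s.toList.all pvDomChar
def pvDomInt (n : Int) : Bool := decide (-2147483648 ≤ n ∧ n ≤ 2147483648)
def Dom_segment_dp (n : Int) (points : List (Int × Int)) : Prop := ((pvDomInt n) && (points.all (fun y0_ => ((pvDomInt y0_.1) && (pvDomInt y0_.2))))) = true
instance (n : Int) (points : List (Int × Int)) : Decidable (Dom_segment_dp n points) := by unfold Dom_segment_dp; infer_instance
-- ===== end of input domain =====

-- B replaces A's bottom-up n-by-n table by a top-down memoized recursion f(l, r) over
-- interval states, recursing from the singleton intervals outward (alternative decomposition).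


-- ===== PORT A =====
-- the value A writes into dp[l][r] (Python locals left_score / right_score inlined into v)
def pvVA (n : Int) (points : List (Int × Int)) (l : Int) (dp : List (List Int)) (r : Int) : Int :=
  let left_score : Int :=
    if 0 < l ∧ l ≤ (PySem.List.pyGetD points (l - 1) (0, 0)).1 ∧
        (PySem.List.pyGetD points (l - 1) (0, 0)).1 ≤ r then
      (PySem.List.pyGetD points (l - 1) (0, 0)).2
    else 0
  let right_score : Int :=
    if r < n - 1 ∧ l ≤ (PySem.List.pyGetD points (r + 1) (0, 0)).1 ∧
        (PySem.List.pyGetD points (r + 1) (0, 0)).1 ≤ r then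
      (PySem.List.pyGetD points (r + 1) (0, 0)).2
    else 0
  max
    (if r < n - 1 then
      PySem.List.pyGetD (PySem.List.pyGetD dp l []) (r + 1) 0 + right_score
    else 0)
    (if 0 < l then
      PySem.List.pyGetD (PySem.List.pyGetD dp (l - 1) []) r 0 + left_score
    else 0)

-- body of A's inner loop: dp[l][r] = v; indices are in range under Pre_, so pyGetD/pySetD are exact
def pvBodyA (n : Int) (points : List (Int × Int)) (l : Int) (dp : List (List Int)) (r : Int) : List (List Int) :=
  PySem.List.pySetD dp l (PySem.List.pySetD (PySem.List.pyGetD dp l []) r (pvVA n points l dp r))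

def segment_dp (n : Int) (points : List (Int × Int)) : Int :=
  let dp : List (List Int) :=
    (PySem.List.pyRange 0 n 1).map (fun _ => List.replicate n.toNat 0)
  let dp :=
    (PySem.List.pyRange 0 n 1).foldl (fun dp l =>
      (PySem.List.pyRange (n - 1) (l - 1) (-1)).foldl (pvBodyA n points l) dp) dp
  match PySem.List.max?
      ((PySem.List.pyRange 0 n 1).map
        (fun i => PySem.List.pyGetD (PySem.List.pyGetD dp i []) i 0)) (fun x => x) with
  | some v => v
  | none => 0   -- Python raises ValueError here (n ≤ 0); excluded by Pre_

-- ===== PORT B =====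
-- Source B's inline score conditionals '(points[r+1][1] if l <= points[r+1][0] <= r else 0)'
-- and its left twin, named here so the recursion below reads like Source B's f
def pvScoreR (points : List (Int × Int)) (l r : Int) : Int :=
  if l ≤ (PySem.List.pyGetD points (r + 1) (0, 0)).1 ∧
      (PySem.List.pyGetD points (r + 1) (0, 0)).1 ≤ r then
    (PySem.List.pyGetD points (r + 1) (0, 0)).2
  else 0

def pvScoreL (points : List (Int × Int)) (l r : Int) : Int :=
  if l ≤ (PySem.List.pyGetD points (l - 1) (0, 0)).1 ∧
      (PySem.List.pyGetD points (l - 1) (0, 0)).1 ≤ r then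
    (PySem.List.pyGetD points (l - 1) (0, 0)).2
  else 0

-- Source B's memoized recursion f(l, r); the memo is a pure cache, so the port is the recursion
-- itself: take_right / take_left with Source B's guards, combined with max
def pvFB (n : Int) (points : List (Int × Int)) (l r : Int) : Int :=
  max
    (if _h : r < n - 1 then pvFB n points l (r + 1) + pvScoreR points l r else 0)
    (if _h : 0 < l then pvFB n points (l - 1) r + pvScoreL points l r else 0)
termination_by ((n - 1 - r).toNat, l.toNat)
decreasing_by
  · exact Prod.Lex.left _ _ (by omega)
  · exact Prod.Lex.right _ (by omega)

def segment_dp_alt (n : Int) (points : List (Int × Int)) : Int :=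
  match PySem.List.max?
      ((PySem.List.pyRange 0 n 1).map (fun i => pvFB n points i i)) (fun x => x) with
  | some v => v
  | none => 0   -- Python raises ValueError here (n ≤ 0); excluded by Pre_

-- ===== PRECONDITION & SPEC =====
-- Pre_ excludes exactly the inputs where Python A raises: n ≤ 0 (max() of an empty
-- generator, ValueError) and n ≥ 2 with fewer than n points (IndexError).
def Pre_segment_dp (n : Int) (points : List (Int × Int)) : Prop :=
  1 ≤ n ∧ (n = 1 ∨ n ≤ (points.length : Int))
instance (n : Int) (points : List (Int × Int)) : Decidable (Pre_segment_dp n points) := by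
  unfold Pre_segment_dp; infer_instance

def pvWitness_segment_dp : Int × (List (Int × Int)) := (2, [(0, 5), (1, 3)])

def Spec_segment_dp (n : Int) (points : List (Int × Int)) (out : Int) : Prop := out = segment_dp_alt n points
instance (n : Int) (points : List (Int × Int)) (out : Int) : Decidable (Spec_segment_dp n points out) := by unfold Spec_segment_dp; infer_instance

-- ===== CLAIM (what is proved, stated in full; the proofs are below) =====
def Claim_equal_segment_dp : Prop := ∀ (n : Int) (points : List (Int × Int)), Dom_segment_dp n points → Pre_segment_dp n points → Spec_segment_dp n points (segment_dp n points)

-- ===== LEMMAS AND PROOFS =====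

-- table lookup, Nat-indexed
def pvG (T : List (List Int)) (i r : Nat) : Int := (T.getD i []).getD r 0

-- claimed table contents after A has processed rows < k and, in row k, columns > a:
-- every written cell holds the recursion value pvFB of its state
def pvVal (n : Int) (points : List (Int × Int)) (k a : Int) (i r : Nat) : Int :=
  if ((i : Int) < k ∧ i ≤ r) ∨ ((i : Int) = k ∧ a < (r : Int)) then
    pvFB n points i r
  else 0

theorem pv_getD_set_eq {α : Type} (xs : List α) (i : Nat) (h : i < xs.length) (v d : α) :
    (xs.set i v).getD i d = v := by
  simp [List.getD_eq_getElem?_getD, h]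

theorem pv_getD_set_ne {α : Type} (xs : List α) (i j : Nat) (h : i ≠ j) (v : α) (d : α) :
    (xs.set i v).getD j d = xs.getD j d := by
  simp [List.getD_eq_getElem?_getD, h]

theorem pvG_update (T : List (List Int)) (K A : Nat) (v : Int)
    (hKT : K < T.length) (hAT : A < (T.getD K []).length) (i r : Nat) :
    pvG (T.set K ((T.getD K []).set A v)) i r = if i = K ∧ r = A then v else pvG T i r := by
  simp only [pvG]
  by_cases hik : i = K
  · subst hik
    rw [pv_getD_set_eq _ _ hKT]
    by_cases hra : r = A
    · subst hra
      rw [pv_getD_set_eq _ _ hAT]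
      simp
    · rw [pv_getD_set_ne _ _ _ (fun h => hra h.symm)]
      simp [hra]
  · rw [pv_getD_set_ne _ _ _ (fun h => hik h.symm)]
    simp [hik]

-- A writes exactly the recursion value into dp[k][a]
theorem pvA_val (n : Int) (points : List (Int × Int)) (k a : Int) (T : List (List Int))
    (hk : 0 ≤ k) (hkn : k < n) (hka : k ≤ a) (han : a ≤ n - 1)
    (hG : ∀ i r : Nat, i < n.toNat → r < n.toNat → pvG T i r = pvVal n points k a i r) :
    pvVA n points k T a = pvFB n points k a := by
  conv_rhs => rw [pvFB]
  simp only [pvVA]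
  congr 1
  · by_cases h1 : a < n - 1
    · rw [if_pos h1, dif_pos h1]
      rw [PySem.List.pyGetD_of_nonneg _ _ hk,
          PySem.List.pyGetD_of_nonneg _ _ (show (0:Int) ≤ a + 1 by omega)]
      have hg := hG k.toNat (a + 1).toNat (by omega) (by omega)
      simp only [pvG] at hg
      rw [hg]
      simp only [pvVal]
      rw [if_pos (Or.inr ⟨by omega, by omega⟩)]
      rw [show ((k.toNat : Nat) : Int) = k from by omega,
          show (((a + 1).toNat : Nat) : Int) = a + 1 from by omega]
      congr 1
      simp only [pvScoreR]
      split_ifs <;> tauto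
    · rw [if_neg h1, dif_neg (by omega)]
  · by_cases h2 : 0 < k
    · rw [if_pos h2, dif_pos h2]
      rw [PySem.List.pyGetD_of_nonneg _ _ (show (0:Int) ≤ k - 1 by omega),
          PySem.List.pyGetD_of_nonneg _ _ (show (0:Int) ≤ a by omega)]
      have hg := hG (k - 1).toNat a.toNat (by omega) (by omega)
      simp only [pvG] at hg
      rw [hg]
      simp only [pvVal]
      rw [if_pos (Or.inl ⟨by omega, by omega⟩)]
      rw [show (((k - 1).toNat : Nat) : Int) = k - 1 from by omega,
          show ((a.toNat : Nat) : Int) = a from by omega]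
      congr 1
      simp only [pvScoreL]
      split_ifs <;> tauto
    · rw [if_neg h2, dif_neg (by omega)]

-- A's inner-loop body performs one correct update
theorem pvA_step (n : Int) (points : List (Int × Int)) (k a : Int) (T : List (List Int))
    (hk : 0 ≤ k) (hkn : k < n) (hka : k ≤ a) (han : a ≤ n - 1)
    (hlen : T.length = n.toNat) (hrows : ∀ row ∈ T, row.length = n.toNat)
    (hG : ∀ i r : Nat, i < n.toNat → r < n.toNat → pvG T i r = pvVal n points k a i r) :
    (pvBodyA n points k T a).length = n.toNat ∧
    (∀ row ∈ pvBodyA n points k T a, row.length = n.toNat) ∧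
    (∀ i r : Nat, i < n.toNat → r < n.toNat →
      pvG (pvBodyA n points k T a) i r = pvVal n points k (a - 1) i r) := by
  have hkT : k.toNat < T.length := by omega
  have hrowlen : (T.getD k.toNat []).length = n.toNat := by
    rw [List.getD_eq_getElem _ _ hkT]
    exact hrows _ (List.getElem_mem hkT)
  have haT : a.toNat < (T.getD k.toNat []).length := by omega
  have hbody : pvBodyA n points k T a
      = T.set k.toNat ((T.getD k.toNat []).set a.toNat (pvVA n points k T a)) := by
    simp only [pvBodyA]
    rw [PySem.List.pySetD_of_nonneg _ _ hk,
        PySem.List.pySetD_of_nonneg _ _ (show (0:Int) ≤ a by omega),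
        PySem.List.pyGetD_of_nonneg _ _ hk]
  refine ⟨?_, ?_, ?_⟩
  · rw [hbody]; simp [hlen]
  · intro row hrow
    rw [hbody] at hrow
    rcases List.mem_or_eq_of_mem_set hrow with h | h
    · exact hrows _ h
    · subst h
      rw [List.length_set]
      exact hrowlen
  · intro i r hi hr
    rw [hbody, pvG_update T k.toNat a.toNat _ hkT haT i r,
        pvA_val n points k a T hk hkn hka han hG]
    by_cases hcase : i = k.toNat ∧ r = a.toNat
    · rw [if_pos hcase]
      simp only [pvVal]
      rw [if_pos (Or.inr ⟨by omega, by omega⟩)]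
      rw [hcase.1, hcase.2]
      congr 1 <;> omega
    · rw [if_neg hcase, hG i r hi hr]
      simp only [pvVal]
      split_ifs <;> first | rfl | omega

-- A's inner loop, from column a down to k
theorem pvA_inner (n : Int) (points : List (Int × Int)) (k : Int)
    (hk : 0 ≤ k) (hkn : k < n) :
    ∀ (cnt : Nat) (a : Int) (T : List (List Int)), (a - (k - 1)).toNat = cnt →
    k - 1 ≤ a → a ≤ n - 1 →
    T.length = n.toNat → (∀ row ∈ T, row.length = n.toNat) →
    (∀ i r : Nat, i < n.toNat → r < n.toNat → pvG T i r = pvVal n points k a i r) →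
    ((PySem.List.pyRange a (k - 1) (-1)).foldl (pvBodyA n points k) T).length = n.toNat ∧
    (∀ row ∈ (PySem.List.pyRange a (k - 1) (-1)).foldl (pvBodyA n points k) T, row.length = n.toNat) ∧
    (∀ i r : Nat, i < n.toNat → r < n.toNat →
      pvG ((PySem.List.pyRange a (k - 1) (-1)).foldl (pvBodyA n points k) T) i r
        = pvVal n points k (k - 1) i r) := by
  intro cnt
  induction cnt with
  | zero =>
    intro a T hcnt ha han hlen hrows hG
    have hak : a = k - 1 := by omega
    subst hak
    rw [PySem.List.pyRange_neg_one_eq_nil (le_refl _)]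
    simp only [List.foldl_nil]
    exact ⟨hlen, hrows, hG⟩
  | succ c ih =>
    intro a T hcnt ha han hlen hrows hG
    rw [PySem.List.pyRange_neg_one_cons (by omega : k - 1 < a), List.foldl_cons]
    obtain ⟨l1, l2, l3⟩ := pvA_step n points k a T hk hkn (by omega) han hlen hrows hG
    exact ih (a - 1) (pvBodyA n points k T a) (by omega) (by omega) (by omega) l1 l2 l3

-- A's outer loop over rows
theorem pvA_outer (n : Int) (points : List (Int × Int)) :
    ∀ (cnt : Nat) (k : Int) (T : List (List Int)), (n - k).toNat = cnt →
    0 ≤ k → k ≤ n →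
    T.length = n.toNat → (∀ row ∈ T, row.length = n.toNat) →
    (∀ i r : Nat, i < n.toNat → r < n.toNat → pvG T i r = pvVal n points k (n - 1) i r) →
    (∀ i r : Nat, i < n.toNat → r < n.toNat →
      pvG ((PySem.List.pyRange k n 1).foldl
            (fun dp l => (PySem.List.pyRange (n - 1) (l - 1) (-1)).foldl (pvBodyA n points l) dp) T) i r
        = pvVal n points n (n - 1) i r) := by
  intro cnt
  induction cnt with
  | zero =>
    intro k T hcnt hk0 hkn hlen hrows hG
    have hkn' : k = n := by omega
    subst hkn'
    rw [PySem.List.pyRange_one_eq_nil (le_refl _)]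
    simp only [List.foldl_nil]
    exact hG
  | succ c ih =>
    intro k T hcnt hk0 hkn hlen hrows hG
    rw [PySem.List.pyRange_one_cons (by omega : k < n), List.foldl_cons]
    obtain ⟨m1, m2, m3⟩ := pvA_inner n points k hk0 (by omega)
      ((n - 1) - (k - 1)).toNat (n - 1) T rfl (by omega) (le_refl _) hlen hrows hG
    have m3' : ∀ i r : Nat, i < n.toNat → r < n.toNat →
        pvG ((PySem.List.pyRange (n - 1) (k - 1) (-1)).foldl (pvBodyA n points k) T) i r
          = pvVal n points (k + 1) (n - 1) i r := by
      intro i r hi hr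
      rw [m3 i r hi hr]
      simp only [pvVal]
      split_ifs <;> first | rfl | omega
    exact ih (k + 1) _ (by omega) (by omega) (by omega) m1 m2 m3'

-- ===== VERDICT (by name: the statement is the Claim_ definition above) =====
theorem segment_dp_spec : Claim_equal_segment_dp := by
  intro n points _hd _hp
  simp only [Spec_segment_dp]
  by_cases hn : n ≤ 0
  · simp only [segment_dp, segment_dp_alt,
      PySem.List.pyRange_one_eq_nil hn, List.map_nil, List.foldl_nil]
  · have hG0 : ∀ i r : Nat, i < n.toNat → r < n.toNat →
        pvG ((PySem.List.pyRange 0 n 1).map (fun _ => List.replicate n.toNat (0 : Int))) i r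
          = pvVal n points 0 (n - 1) i r := by
      intro i r hi hr
      have hlen0 : ((PySem.List.pyRange 0 n 1).map (fun _ => List.replicate n.toNat (0 : Int))).length = n.toNat := by
        simp [PySem.List.length_pyRange_one]
      simp only [pvG]
      have hrowe : ((PySem.List.pyRange 0 n 1).map (fun _ => List.replicate n.toNat (0 : Int))).getD i []
          = List.replicate n.toNat (0 : Int) := by
        rw [List.getD_eq_getElem _ _ (by omega)]
        simp only [List.getElem_map]
      rw [hrowe]
      simp only [pvVal]
      rw [if_neg (by omega)]
      simp [List.getD_eq_getElem?_getD, hr]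
    have hrows0 : ∀ row ∈ (PySem.List.pyRange 0 n 1).map (fun _ => List.replicate n.toNat (0 : Int)),
        row.length = n.toNat := by
      intro row hrow
      rcases List.mem_map.mp hrow with ⟨_, _, rfl⟩
      simp
    have hA := pvA_outer n points n.toNat 0
      ((PySem.List.pyRange 0 n 1).map (fun _ => List.replicate n.toNat (0 : Int)))
      (by omega) (by omega) (by omega)
      (by simp [PySem.List.length_pyRange_one]) hrows0 hG0
    have hlist : ((PySem.List.pyRange 0 n 1).map (fun i =>
        PySem.List.pyGetD (PySem.List.pyGetD ((PySem.List.pyRange 0 n 1).foldl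
          (fun dp l => (PySem.List.pyRange (n - 1) (l - 1) (-1)).foldl (pvBodyA n points l) dp)
          ((PySem.List.pyRange 0 n 1).map (fun _ => List.replicate n.toNat (0 : Int)))) i []) i 0))
      = (PySem.List.pyRange 0 n 1).map (fun i => pvFB n points i i) := by
      apply List.map_congr_left
      intro i hi
      rw [PySem.List.mem_pyRange_one] at hi
      rw [PySem.List.pyGetD_of_nonneg _ _ hi.1, PySem.List.pyGetD_of_nonneg _ _ hi.1]
      have h := hA i.toNat i.toNat (by omega) (by omega)
      simp only [pvG] at h
      rw [h]
      simp only [pvVal]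
      rw [if_pos (Or.inl ⟨by omega, le_refl _⟩)]
      congr 1 <;> omega
    simp only [segment_dp, segment_dp_alt]
    rw [hlist]
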